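-- pv_equiv track=rewrite | github.com/Mati2206/Matura-Informatyka | czerwiec 2023 formuła 2023/zad1.py | iloczyn_zlicz
-- ===== SOURCE A (Python) =====
-- def iloczyn_zlicz(x, y, l=0):
--     if (y == 1):
--         return x, l
--     k = int(y/2)
--     z, l = iloczyn_zlicz(x, k, l)
--     if (y%2 == 0):
--         l += 1
--         return z+z, l
--     l += 2
--     return x+z+z, l
-- ===== SOURCE B (Python) =====
-- def iloczyn_zlicz(x, y, l=0):
--     # iterative: collect the halving chain down to 1, then fold it back up
--     vals = []
--     v = y
--     while v != 1:
--         vals.append(v)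
--         v = int(v / 2)
--     z = x
--     for v in reversed(vals):
--         if v % 2 == 0:
--             z = z + z
--             l += 1
--         else:
--             z = x + z + z
--             l += 2
--     return z, l
-- ===== Notes on version B (the rewrite author's own statement) =====
-- stated objective: alternative
-- what changed: Replaces the recursion with an explicit iteratively-built halving chain that is then folded back upward with an accumulator; no call stack.
import Mathlib
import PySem

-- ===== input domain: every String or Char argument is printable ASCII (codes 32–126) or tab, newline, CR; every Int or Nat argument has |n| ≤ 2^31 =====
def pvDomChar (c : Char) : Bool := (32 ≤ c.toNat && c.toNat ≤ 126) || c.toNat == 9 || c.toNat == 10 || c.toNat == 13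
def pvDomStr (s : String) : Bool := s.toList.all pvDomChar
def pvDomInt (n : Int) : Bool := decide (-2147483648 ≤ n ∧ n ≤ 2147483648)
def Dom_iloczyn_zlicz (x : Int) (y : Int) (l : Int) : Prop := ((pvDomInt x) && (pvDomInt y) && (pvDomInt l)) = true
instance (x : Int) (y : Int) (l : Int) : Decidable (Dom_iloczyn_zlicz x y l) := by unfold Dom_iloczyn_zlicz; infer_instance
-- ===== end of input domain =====

-- B rebuilds the product by first materialising the halving chain iteratively and then
-- folding it back upward (accumulator loop instead of recursion); not faster, alternative decomposition.
-- Equivalence is proved on Pre_ (1 ≤ y); for y ≤ 0 the Python A raises RecursionError.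

-- used by both ports' termination proofs
theorem pv_tdiv2_lt (y : Int) (h : ¬ y ≤ 1) : (y.tdiv 2).toNat < y.toNat := by
  have h2 : (2:Int) ≤ y := by omega
  have hnn : 0 ≤ y := by omega
  have heq : y.tdiv 2 = y / 2 := Int.tdiv_eq_ediv_of_nonneg hnn
  have h1 : y / 2 < y := by omega
  have h0 : 0 ≤ y / 2 := by omega
  omega

-- ===== PORT A =====
-- literal recursion of A; the `y ≤ 1` guard only makes the function total
-- (Python never returns for y < 1, excluded by Pre_); int(y/2) is exact truncating
-- division on Dom, ported as Int.tdiv.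
def iloczyn_zlicz (x : Int) (y : Int) (l : Int) : Int × Int :=
  if h : y ≤ 1 then (x, l)
  else
    let k := y.tdiv 2
    let p := iloczyn_zlicz x k l
    if PySem.Int.mod y 2 == 0 then (p.1 + p.1, p.2 + 1)
    else (x + p.1 + p.1, p.2 + 2)
termination_by y.toNat
decreasing_by exact pv_tdiv2_lt y h

-- ===== PORT B =====
-- the `while v != 1` chain (guard `y ≤ 1` for totality; Python loops forever for y < 1)
def pvChain (y : Int) : List Int :=
  if h : y ≤ 1 then [] else y :: pvChain (y.tdiv 2)
termination_by y.toNat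
decreasing_by exact pv_tdiv2_lt y h

def pvStep (x : Int) (p : Int × Int) (v : Int) : Int × Int :=
  if PySem.Int.mod v 2 == 0 then (p.1 + p.1, p.2 + 1) else (x + p.1 + p.1, p.2 + 2)

def iloczyn_zlicz_alt (x : Int) (y : Int) (l : Int) : Int × Int :=
  (pvChain y).reverse.foldl (pvStep x) (x, l)

-- ===== PRECONDITION & SPEC =====
-- Pre_ excludes y ≤ 0, on which the Python A raises RecursionError (never returns).
def Pre_iloczyn_zlicz (x : Int) (y : Int) (l : Int) : Prop := 1 ≤ y
instance (x : Int) (y : Int) (l : Int) : Decidable (Pre_iloczyn_zlicz x y l) := by unfold Pre_iloczyn_zlicz; infer_instance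
def pvWitness_iloczyn_zlicz : Int × Int × Int := (7, 13, 0)
def Spec_iloczyn_zlicz (x : Int) (y : Int) (l : Int) (out : Int × Int) : Prop := out = iloczyn_zlicz_alt x y l
instance (x : Int) (y : Int) (l : Int) (out : Int × Int) : Decidable (Spec_iloczyn_zlicz x y l out) := by unfold Spec_iloczyn_zlicz; infer_instance

-- ===== CLAIM (what is proved, stated in full; the proofs are below) =====
def Claim_equal_iloczyn_zlicz : Prop := ∀ (x : Int) (y : Int) (l : Int), Dom_iloczyn_zlicz x y l → Pre_iloczyn_zlicz x y l → Spec_iloczyn_zlicz x y l (iloczyn_zlicz x y l)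

-- ===== LEMMAS AND PROOFS =====

theorem pv_alt_unfold (x y l : Int) (h : ¬ y ≤ 1) :
    iloczyn_zlicz_alt x y l = pvStep x (iloczyn_zlicz_alt x (y.tdiv 2) l) y := by
  unfold iloczyn_zlicz_alt
  rw [pvChain]
  simp [h, List.foldl_append]

theorem pv_eq (x y l : Int) : iloczyn_zlicz x y l = iloczyn_zlicz_alt x y l := by
  by_cases h : y ≤ 1
  · rw [iloczyn_zlicz, iloczyn_zlicz_alt, pvChain]
    simp [h]
  · rw [iloczyn_zlicz, pv_alt_unfold x y l h]
    simp only [h, dite_false, ← pv_eq x (y.tdiv 2) l, pvStep]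
termination_by y.toNat
decreasing_by all_goals exact pv_tdiv2_lt y h

-- ===== VERDICT (by name: the statement is the Claim_ definition above) =====
theorem iloczyn_zlicz_spec : Claim_equal_iloczyn_zlicz := by
  intro x y l _ _
  unfold Spec_iloczyn_zlicz
  exact pv_eq x y l
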